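-- pv_equiv track=rewrite | github.com/VladMRG2001/Hiding_Secrets | HidingSecrets.py | text_to_ternary_chunks_correct
-- ===== SOURCE A (Python) =====
-- def text_to_ternary_chunks_correct(text):
--     """Converteste textul în chunk-uri ternare de 14 cifre (2 caractere per bloc)."""
--     ternary_chunks = []
--
--     # Completează cu spațiu dacă lungimea e impară
--     if len(text) % 2 != 0:
--         text += " "
--
--     for i in range(0, len(text), 2):
--         # 1. Extrage perechea de caractere
--         char1, char2 = text[i], text[i+1]
--
--         # 2. Converteste fiecare caracter în binar pe 8 biți
--         bin_str = format(ord(char1), '08b') + format(ord(char2), '08b')  # Ex: "EA" → "0100010101000001"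
--
--         # 3. Combină binarul într-un număr zecimal
--         decimal_val = int(bin_str, 2)  # "0100010101000001" → 17729
--
--         # 4. Converteste zecimal în baza 3 (ca șir de cifre)
--         ternary_str = ""
--         num = decimal_val
--         while num > 0:
--             num, remainder = divmod(num, 3)
--             ternary_str += str(remainder)
--         ternary_str = ternary_str[::-1]  # Inversează ordinea cifrelor
--
--         # 5. Adaugă padding de 0 în față până la 14 cifre
--         ternary_str = ternary_str.zfill(14)
--         ternary_chunks.append([int(c) for c in ternary_str])
--
--     return ternary_chunks
-- ===== SOURCE B (Python) =====
-- def _chunk(c1, c2):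
--     # same binary-concatenation value as A (kept deliberately: exact for any ord width)
--     v = int(format(ord(c1), '08b') + format(ord(c2), '08b'), 2)
--     # number of ternary digits to emit: at least 14, more only if v needs them
--     n = 14
--     while 3 ** n <= v:
--         n += 1
--     # top-down positional base-3 digits (MSB first), no remainder accumulation/reversal
--     return [v // 3 ** (n - 1 - k) % 3 for k in range(n)]
--
--
-- def text_to_ternary_chunks_correct(text):
--     """Same 14-digit ternary chunks, but each chunk is read off top-down by
--     positional powers of 3 over zipped character pairs, instead of an LSB-first
--     divmod loop with string reversal and zfill."""
--     if len(text) % 2 != 0: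
--         text += " "
--     it = iter(text)
--     return [_chunk(c1, c2) for c1, c2 in zip(it, it)]
-- ===== Notes on version B (the rewrite author's own statement) =====
-- stated objective: alternative
-- what changed: The LSB-first divmod accumulation with string reversal and zfill padding is replaced by a top-down positional read-off of base-3 digits via powers of 3, and the index loop over range(0, len, 2) by zipping one iterator with itself into character pairs.
import Mathlib
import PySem

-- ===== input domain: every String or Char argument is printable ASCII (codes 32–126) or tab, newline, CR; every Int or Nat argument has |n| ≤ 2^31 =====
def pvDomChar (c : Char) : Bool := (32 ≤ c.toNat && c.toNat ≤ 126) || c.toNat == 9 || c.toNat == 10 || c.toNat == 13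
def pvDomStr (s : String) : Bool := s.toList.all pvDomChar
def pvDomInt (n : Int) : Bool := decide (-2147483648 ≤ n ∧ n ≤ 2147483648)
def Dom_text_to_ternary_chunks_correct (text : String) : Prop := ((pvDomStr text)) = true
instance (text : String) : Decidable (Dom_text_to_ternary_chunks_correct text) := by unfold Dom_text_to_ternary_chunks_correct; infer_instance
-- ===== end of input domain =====

-- B replaces A's LSB-first divmod/reverse/zfill digit pipeline by a top-down positional
-- base-3 read-off over zipped character pairs; objective: alternative decomposition (same cost).

-- ===== PORT A =====

-- the `while num > 0: num, remainder = divmod(num, 3); ternary_str += str(remainder)` loop;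
-- `fuel` is only a termination guard (the caller passes num.toNat + 1, and the quotient
-- shrinks by a factor 3 each step, so the guard never cuts the loop short: num < 3 ^ fuel).
def pvTernRev (fuel : Nat) (num : Int) (acc : List Char) : List Char :=
  match fuel with
  | 0 => acc
  | f + 1 =>
    if 0 < num then
      match PySem.Int.divmod? num 3 with
      | some (q, r) => pvTernRev f q (acc ++ PySem.Int.toChars r)
      | none => acc   -- unreachable: the divisor 3 is not 0
    else acc

-- the body of A's `for` loop for one character pair
def pvChunkA (c1 c2 : Char) : List Int :=
  -- bin_str = format(ord(char1), '08b') + format(ord(char2), '08b')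
  let binChars := PySem.Chars.zfill (PySem.Int.toBinChars (c1.toNat : Int)) 8
                  ++ PySem.Chars.zfill (PySem.Int.toBinChars (c2.toNat : Int)) 8
  -- decimal_val = int(bin_str, 2); always `some`: a nonempty string of binary digits
  let decimalVal := (PySem.Int.ofCharsBase? binChars 2).getD 0
  let ternRev := pvTernRev (decimalVal.toNat + 1) decimalVal []
  -- ternary_str[::-1], .zfill(14), [int(c) for c in …]; int(c) on a digit char is always `some`
  (PySem.Chars.zfill ternRev.reverse 14).map (fun c => (PySem.Int.ofChars? [c]).getD 0)

def text_to_ternary_chunks_correct (text : String) : List (List Int) :=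
  let cs := text.toList
  let padded := if cs.length % 2 ≠ 0 then cs ++ [' '] else cs
  -- for i in range(0, len(text), 2): …append([…]); text[i]/text[i+1] are always in range
  (PySem.List.pyRange 0 (padded.length : Int) 2).foldl
    (fun acc i => acc ++ [pvChunkA (PySem.List.pyGetD padded i ' ')
                                   (PySem.List.pyGetD padded (i + 1) ' ')]) []

-- ===== PORT B =====

-- zip(it, it) over one iterator: consecutive disjoint pairs
def pvPairs : List Char → List (Char × Char)
  | c1 :: c2 :: rest => (c1, c2) :: pvPairs rest
  | _ => []

-- the `n = 14; while 3 ** n <= v: n += 1` loop; `fuel` is only a termination guard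
-- (the caller passes v.toNat + 1, far more iterations than the loop can take);
-- n stays ≥ 14, so the `.toNat` in the exponent is exact.
def pvNumDigits (fuel : Nat) (v n : Int) : Int :=
  match fuel with
  | 0 => n
  | f + 1 => if (3 : Int) ^ n.toNat ≤ v then pvNumDigits f v (n + 1) else n

-- _chunk(c1, c2)
def pvChunkB (c1 c2 : Char) : List Int :=
  -- v = int(format(ord(c1), '08b') + format(ord(c2), '08b'), 2); always `some`
  let v := (PySem.Int.ofCharsBase? (PySem.Chars.zfill (PySem.Int.toBinChars (c1.toNat : Int)) 8
            ++ PySem.Chars.zfill (PySem.Int.toBinChars (c2.toNat : Int)) 8) 2).getD 0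
  let n := pvNumDigits (v.toNat + 1) v 14
  -- [v // 3 ** (n - 1 - k) % 3 for k in range(n)]; k ≤ n - 1, so the `.toNat` is exact
  (PySem.List.pyRange 0 n 1).map
    (fun k => PySem.Int.mod (PySem.Int.floordiv v ((3 : Int) ^ (n - 1 - k).toNat)) 3)

def text_to_ternary_chunks_correct_alt (text : String) : List (List Int) :=
  let cs := text.toList
  let padded := if cs.length % 2 ≠ 0 then cs ++ [' '] else cs
  (pvPairs padded).map (fun p => pvChunkB p.1 p.2)

-- ===== PRECONDITION & SPEC =====
def Spec_text_to_ternary_chunks_correct (text : String) (out : List (List Int)) : Prop := out = text_to_ternary_chunks_correct_alt text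
instance (text : String) (out : List (List Int)) : Decidable (Spec_text_to_ternary_chunks_correct text out) := by unfold Spec_text_to_ternary_chunks_correct; infer_instance

-- ===== CLAIM (what is proved, stated in full; the proofs are below) =====
def Claim_equal_text_to_ternary_chunks_correct : Prop := ∀ (text : String), Dom_text_to_ternary_chunks_correct text → Spec_text_to_ternary_chunks_correct text (text_to_ternary_chunks_correct text)

-- ===== LEMMAS AND PROOFS =====

lemma noIntSpace_dropWhile (cs : List Char) (h : ∀ c ∈ cs, c = '0' ∨ c = '1') :
    List.dropWhile PySem.Int.isIntSpace cs = cs := by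
  cases cs with
  | nil => rfl
  | cons a t =>
    have : PySem.Int.isIntSpace a = false := by
      rcases h a (by simp) with rfl | rfl <;> decide
    simp [this]

-- int(s, 2) on a string of binary digit characters never returns a negative number
lemma parse_nonneg (cs : List Char) (h : ∀ c ∈ cs, c = '0' ∨ c = '1') :
    0 ≤ (PySem.Int.ofCharsBase? cs 2).getD 0 := by
  simp only [PySem.Int.ofCharsBase?]
  rw [noIntSpace_dropWhile cs h,
     noIntSpace_dropWhile cs.reverse (by intro c hc; exact h c (List.mem_reverse.mp hc)),
     List.reverse_reverse]
  cases cs with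
  | nil => decide
  | cons a t =>
    rcases h a (by simp) with rfl | rfl
    · cases t with
      | nil => decide
      | cons b r =>
        rcases h b (by simp [List.mem_cons]) with rfl | rfl <;>
        · simp
          split <;> simp
    · simp
      split <;> simp

lemma toDigitsCore_binary_mem :
    ∀ (fuel n : Nat) (acc : List Char), (∀ c ∈ acc, c = '0' ∨ c = '1') →
      ∀ c ∈ Nat.toDigitsCore 2 fuel n acc, c = '0' ∨ c = '1' := by
  intro fuel
  induction fuel with
  | zero => intro n acc hacc c hc; exact hacc c hc
  | succ f ih =>
    intro n acc hacc c hc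
    have hd : Nat.digitChar (n % 2) = '0' ∨ Nat.digitChar (n % 2) = '1' := by
      have : n % 2 < 2 := Nat.mod_lt _ (by norm_num)
      interval_cases h : n % 2 <;> simp [Nat.digitChar]
    simp only [Nat.toDigitsCore] at hc
    split at hc
    · rcases List.mem_cons.mp hc with rfl | hc
      · exact hd
      · exact hacc c hc
    · refine ih _ _ ?_ c hc
      intro d hdm
      rcases List.mem_cons.mp hdm with rfl | hdm
      · exact hd
      · exact hacc d hdm

lemma zfill_mem (cs : List Char) (w : Int) :
    ∀ c ∈ PySem.Chars.zfill cs w, c = '0' ∨ c ∈ cs := by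
  intro c hc
  cases cs with
  | nil =>
    simp only [PySem.Chars.zfill] at hc
    split at hc
    · simp at hc
    · left; exact List.eq_of_mem_replicate hc
  | cons c0 rest =>
    simp only [PySem.Chars.zfill] at hc
    split at hc
    · right; exact hc
    · split at hc
      · rcases List.mem_cons.mp hc with rfl | hc
        · right; simp
        · rcases List.mem_append.mp hc with h | h
          · left; exact List.eq_of_mem_replicate h
          · right; simp [h]
      · rcases List.mem_append.mp hc with h | h
        · left; exact List.eq_of_mem_replicate h
        · right; exact h

-- format(ord(c), '08b') consists of the characters '0' and '1' only
lemma binChars_mem (a : Nat) :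
    ∀ c ∈ PySem.Chars.zfill (PySem.Int.toBinChars (a : Int)) 8, c = '0' ∨ c = '1' := by
  have hbin : ∀ c ∈ PySem.Int.toBinChars (a : Int), c = '0' ∨ c = '1' := by
    intro c hc
    simp only [PySem.Int.toBinChars] at hc
    rw [if_neg (by omega)] at hc
    exact toDigitsCore_binary_mem _ _ [] (by simp) c hc
  intro c hc
  rcases zfill_mem _ _ c hc with rfl | h
  · left; rfl
  · exact hbin c h

lemma sublist_mem_binary {xs ys : List Char}
    (hx : ∀ c ∈ xs, c = '0' ∨ c = '1') (hy : ∀ c ∈ ys, c = '0' ∨ c = '1') :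
    ∀ c ∈ xs ++ ys, c = '0' ∨ c = '1' := by
  intro c hc
  rcases List.mem_append.mp hc with h | h
  · exact hx c h
  · exact hy c h

lemma pvTernRev_succ (f : Nat) (num : Int) (acc : List Char) (h : 0 < num) :
    pvTernRev (f + 1) num acc
      = pvTernRev f (Int.fdiv num 3) (acc ++ PySem.Int.toChars (Int.fmod num 3)) := by
  simp [pvTernRev, PySem.Int.divmod?, h]

-- the divmod loop produces exactly the base-3 digits, least significant first
lemma ternRev_spec : ∀ (fuel m : Nat) (acc : List Char), m < 3 ^ fuel →
    pvTernRev fuel (m : Int) acc = acc ++ (Nat.digits 3 m).map Nat.digitChar := by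
  intro fuel
  induction fuel with
  | zero => intro m acc h; interval_cases m; simp [pvTernRev]
  | succ f ih =>
    intro m acc h
    by_cases hm : m = 0
    · subst hm; simp [pvTernRev]
    · have hmpos : 0 < (m : Int) := by positivity
      have hq : Int.fdiv (m : Int) 3 = ((m / 3 : Nat) : Int) := by
        rw [Int.fdiv_eq_ediv]
        norm_num
      have hr : Int.fmod (m : Int) 3 = ((m % 3 : Nat) : Int) := by
        rw [Int.fmod_eq_emod]
        norm_num
      have htc : PySem.Int.toChars ((m % 3 : Nat) : Int) = [Nat.digitChar (m % 3)] := by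
        have : m % 3 < 3 := Nat.mod_lt _ (by norm_num)
        interval_cases h3 : m % 3 <;> decide
      rw [pvTernRev_succ f (m : Int) acc hmpos, hq, hr, htc]
      rw [ih (m / 3) _ (by
        have : m < 3 ^ f * 3 := by rw [← pow_succ]; exact h
        omega)]
      rw [Nat.digits_def' (by norm_num : 1 < 3) (Nat.pos_of_ne_zero hm)]
      simp

-- int(c) of a single digit char
lemma ofChars_digitChar (d : Nat) (hd : d < 3) :
    (PySem.Int.ofChars? [Nat.digitChar d]).getD 0 = (d : Int) := by
  interval_cases d <;> decide

-- zfill on a string of digit characters is left padding with '0'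
lemma zfill_digits (cs : List Char) (h : ∀ c ∈ cs, c = '0' ∨ c = '1' ∨ c = '2') :
    PySem.Chars.zfill cs 14 = List.replicate (14 - cs.length) '0' ++ cs := by
  cases cs with
  | nil =>
    norm_num [PySem.Chars.zfill]
    omega
  | cons c0 rest =>
    simp only [PySem.Chars.zfill]
    split
    next hle =>
      have hlen : (14 : Nat) ≤ (c0 :: rest).length := by exact_mod_cast hle
      rw [show 14 - (c0 :: rest).length = 0 from by omega]
      simp
    next hgt =>
      rw [if_neg (by rcases h c0 (by simp) with rfl | rfl | rfl <;> decide)]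
      norm_num
      omega

lemma digits3_mem (m : Nat) : ∀ d ∈ Nat.digits 3 m, d = 0 ∨ d = 1 ∨ d = 2 := by
  intro d hd
  have := Nat.digits_lt_base (by norm_num) hd
  omega

-- Nat-level mirror of the counting loop
def pvCntNat (fuel m n : Nat) : Nat :=
  match fuel with
  | 0 => n
  | f + 1 => if 3 ^ n ≤ m then pvCntNat f m (n + 1) else n

lemma pvNumDigits_cast : ∀ (fuel m n : Nat),
    pvNumDigits fuel (m : Int) (n : Int) = ((pvCntNat fuel m n : Nat) : Int) := by
  intro fuel
  induction fuel with
  | zero => intro m n; rfl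
  | succ f ih =>
    intro m n
    simp only [pvNumDigits, pvCntNat, Int.toNat_natCast]
    by_cases h : 3 ^ n ≤ m
    · rw [if_pos (by exact_mod_cast h), if_pos h, show ((n:Int) + 1) = ((n+1 : Nat) : Int) by push_cast; ring, ih]
    · rw [if_neg (by exact_mod_cast h), if_neg h]

lemma pvCntNat_spec : ∀ (fuel n m : Nat), m < 3 ^ (n + fuel) →
    n ≤ pvCntNat fuel m n ∧ m < 3 ^ (pvCntNat fuel m n) ∧
      (pvCntNat fuel m n = n ∨ 3 ^ (pvCntNat fuel m n - 1) ≤ m) := by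
  intro fuel
  induction fuel with
  | zero => intro n m h; exact ⟨le_refl n, by simpa using h, Or.inl rfl⟩
  | succ f ih =>
    intro n m h
    simp only [pvCntNat]
    by_cases hc : 3 ^ n ≤ m
    · rw [if_pos hc]
      obtain ⟨h1, h2, h3⟩ := ih (n + 1) m (by rw [show n + 1 + f = n + (f + 1) from by ring]; exact h)
      refine ⟨by omega, h2, Or.inr ?_⟩
      rcases h3 with he | hge
      · rw [he]; simpa using hc
      · exact hge
    · rw [if_neg hc]
      exact ⟨le_refl n, by omega, Or.inl rfl⟩

-- the length of the base-3 digit list vs powers of 3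
lemma digits_len_le_iff {m n : Nat} : (Nat.digits 3 m).length ≤ n ↔ m < 3 ^ n := by
  constructor
  · intro h
    calc m < 3 ^ (Nat.digits 3 m).length := Nat.lt_base_pow_length_digits (by norm_num)
    _ ≤ 3 ^ n := Nat.pow_le_pow_right (by norm_num) h
  · intro h
    by_contra hlt
    rw [not_le] at hlt
    have hm : m ≠ 0 := by
      intro hm; subst hm; simp at hlt
    have h1 : 3 ^ (Nat.digits 3 m).length ≤ 3 * m := Nat.base_pow_length_digits_le 3 m (by norm_num) hm
    have h2 : 3 ^ (n + 1) ≤ 3 ^ (Nat.digits 3 m).length := Nat.pow_le_pow_right (by norm_num) (by omega)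
    have : 3 ^ (n + 1) = 3 * 3 ^ n := by ring
    omega

-- the counting loop returns max 14 (number of base-3 digits)
lemma cnt_eq_max (m : Nat) :
    pvCntNat (m + 1) m 14 = max 14 (Nat.digits 3 m).length := by
  obtain ⟨h1, h2, h3⟩ := pvCntNat_spec (m + 1) 14 m (by
    calc m < 3 ^ m := Nat.lt_pow_self (by norm_num)
    _ ≤ 3 ^ (14 + (m + 1)) := Nat.pow_le_pow_right (by norm_num) (by omega))
  set N := pvCntNat (m + 1) m 14 with hN
  have hL : (Nat.digits 3 m).length ≤ N := digits_len_le_iff.mpr h2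
  rcases h3 with he | hge
  · omega
  · have : ¬ ((Nat.digits 3 m).length ≤ N - 1) := by
      rw [digits_len_le_iff]
      omega
    omega

-- reversing an indexed map
lemma map_range_reverse {α : Type} (f : Nat → α) (n : Nat) :
    ((List.range n).map f).reverse = (List.range n).map (fun k => f (n - 1 - k)) := by
  apply List.ext_getElem
  · simp
  · intro i h1 h2
    simp only [List.getElem_reverse, List.length_map, List.length_range,
      List.getElem_map, List.getElem_range]

-- LSB-first positional digits of m, padded with zeros to n positions
lemma digits_range_lsb : ∀ (n m : Nat), m < 3 ^ n →
    (List.range n).map (fun k => m / 3 ^ k % 3)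
      = Nat.digits 3 m ++ List.replicate (n - (Nat.digits 3 m).length) 0 := by
  intro n
  induction n with
  | zero => intro m h; interval_cases m; simp
  | succ n ih =>
    intro m h
    by_cases hm : m = 0
    · subst hm
      simp only [Nat.digits_zero, List.length_nil, Nat.sub_zero, List.nil_append]
      apply List.eq_replicate_iff.mpr
      refine ⟨by simp, ?_⟩
      intro x hx
      simp only [List.mem_map] at hx
      obtain ⟨k, _, rfl⟩ := hx
      simp
    · rw [List.range_succ_eq_map, List.map_cons, List.map_map]
      have hstep : ((List.range n).map ((fun k => m / 3 ^ k % 3) ∘ Nat.succ))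
          = (List.range n).map (fun k => (m / 3) / 3 ^ k % 3) := by
        apply List.map_congr_left
        intro k _
        simp only [Function.comp]
        rw [pow_succ']
        rw [Nat.div_div_eq_div_mul, Nat.mul_comm]
      rw [hstep, ih (m / 3) (by
        have h3 : (3:Nat) ^ (n + 1) = 3 ^ n * 3 := by ring
        omega)]
      rw [Nat.digits_def' (by norm_num : 1 < 3) (Nat.pos_of_ne_zero hm)]
      simp

-- the per-pair values agree (for every pair of characters)
lemma chunk_eq (c1 c2 : Char) : pvChunkA c1 c2 = pvChunkB c1 c2 := by
  have hbin := sublist_mem_binary (binChars_mem c1.toNat) (binChars_mem c2.toNat)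
  set v := (PySem.Int.ofCharsBase?
      (PySem.Chars.zfill (PySem.Int.toBinChars (c1.toNat : Int)) 8
        ++ PySem.Chars.zfill (PySem.Int.toBinChars (c2.toNat : Int)) 8) 2).getD 0 with hv
  have hv0 : 0 ≤ v := parse_nonneg _ hbin
  obtain ⟨m, hm⟩ : ∃ m : Nat, v = (m : Int) := ⟨v.toNat, (Int.toNat_of_nonneg hv0).symm⟩
  set L := (Nat.digits 3 m).length with hL
  -- A's chunk
  have hA : pvChunkA c1 c2
      = List.replicate (14 - L) (0 : Int) ++ ((Nat.digits 3 m).map (Nat.cast : Nat → Int)).reverse := by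
    show (PySem.Chars.zfill (pvTernRev (v.toNat + 1) v []).reverse 14).map
        (fun c => (PySem.Int.ofChars? [c]).getD 0) = _
    rw [hm, Int.toNat_natCast]
    rw [ternRev_spec (m + 1) m [] (by
      calc m < 3 ^ m := Nat.lt_pow_self (by norm_num)
      _ ≤ 3 ^ (m + 1) := Nat.pow_le_pow_right (by norm_num) (by omega))]
    rw [List.nil_append]
    rw [zfill_digits _ (by
      intro c hc
      rw [List.mem_reverse] at hc
      simp only [List.mem_map] at hc
      obtain ⟨d, hd, rfl⟩ := hc
      rcases digits3_mem m d hd with rfl | rfl | rfl <;> simp [Nat.digitChar])]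
    rw [List.map_append]
    congr 1
    · rw [List.map_replicate, List.length_reverse, List.length_map, ← hL]
      congr 1
    · rw [List.map_reverse, List.map_map]
      congr 1
      apply List.map_congr_left
      intro d hd
      exact ofChars_digitChar d (by have := digits3_mem m d hd; omega)
  -- B's chunk
  have hN := cnt_eq_max m
  set N := pvCntNat (m + 1) m 14 with hNdef
  have hLN : L ≤ N := by omega
  have hmN : m < 3 ^ N := by
    rw [← digits_len_le_iff]; omega
  have hB : pvChunkB c1 c2
      = List.replicate (N - L) (0 : Int) ++ ((Nat.digits 3 m).map (Nat.cast : Nat → Int)).reverse := by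
    show (PySem.List.pyRange 0 (pvNumDigits (v.toNat + 1) v 14) 1).map
        (fun k => PySem.Int.mod (PySem.Int.floordiv v ((3 : Int) ^ ((pvNumDigits (v.toNat + 1) v 14) - 1 - k).toNat)) 3) = _
    rw [hm, Int.toNat_natCast, show ((14:Int)) = ((14:Nat):Int) from rfl, pvNumDigits_cast, ← hNdef]
    rw [PySem.List.pyRange_zero_nat, List.map_map]
    have hcongr : ∀ k ∈ List.range N,
        ((fun k => PySem.Int.mod (PySem.Int.floordiv (m : Int) ((3:Int) ^ (((N:Nat):Int) - 1 - k).toNat)) 3) ∘ (fun k : Nat => (k : Int))) k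
          = ((m / 3 ^ (N - 1 - k) % 3 : Nat) : Int) := by
      intro k hk
      have hkN : k < N := List.mem_range.mp hk
      simp only [Function.comp]
      have hexp : (((N:Nat):Int) - 1 - (k:Int)).toNat = N - 1 - k := by omega
      rw [hexp, show ((3:Int) ^ (N - 1 - k)) = (((3 ^ (N - 1 - k) : Nat)) : Int) from by push_cast; ring]
      rw [PySem.Int.floordiv_natCast]
      exact_mod_cast PySem.Int.mod_natCast (m / 3 ^ (N - 1 - k)) 3
    rw [List.map_congr_left hcongr]
    have : (List.range N).map (fun k => ((m / 3 ^ (N - 1 - k) % 3 : Nat) : Int))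
        = ((List.range N).map (fun k => ((m / 3 ^ k % 3 : Nat) : Int))).reverse := by
      rw [map_range_reverse]
    rw [this, show (fun k : Nat => ((m / 3 ^ k % 3 : Nat) : Int))
          = (Nat.cast : Nat → Int) ∘ (fun k => m / 3 ^ k % 3) from rfl, ← List.map_map]
    rw [digits_range_lsb N m hmN]
    rw [List.map_append, List.reverse_append, List.map_replicate, List.reverse_replicate]
    rw [← hL]
    norm_num
  rw [hA, hB]
  have : 14 - L = N - L := by omega
  rw [this]

-- A's index loop over range(0, len, 2) is B's map over consecutive pairs
lemma pairs_loop {β : Type} (g : Char → Char → β) :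
    ∀ (M : Nat) (cs : List Char), cs.length = 2 * M →
      (List.range M).map (fun k => g (cs.getD (2 * k) ' ') (cs.getD (2 * k + 1) ' '))
        = (pvPairs cs).map (fun p => g p.1 p.2) := by
  intro M
  induction M with
  | zero =>
    intro cs h
    have : cs = [] := List.eq_nil_of_length_eq_zero (by omega)
    subst this; rfl
  | succ M ih =>
    intro cs h
    match cs, h with
    | c1 :: c2 :: rest, h =>
      rw [List.range_succ_eq_map, List.map_cons, List.map_map]
      have htail : ((fun k => g ((c1 :: c2 :: rest).getD (2 * k) ' ') ((c1 :: c2 :: rest).getD (2 * k + 1) ' ')) ∘ Nat.succ)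
          = (fun k => g (rest.getD (2 * k) ' ') (rest.getD (2 * k + 1) ' ')) := by
        funext k
        simp only [Function.comp]
        congr 1
      rw [htail, ih rest (by simp at h; omega)]
      rfl

-- ===== VERDICT (by name: the statement is the Claim_ definition above) =====
theorem text_to_ternary_chunks_correct_spec : Claim_equal_text_to_ternary_chunks_correct := by
  intro text _
  unfold Spec_text_to_ternary_chunks_correct
  unfold text_to_ternary_chunks_correct text_to_ternary_chunks_correct_alt
  set cs := text.toList with hcs
  set padded := if cs.length % 2 ≠ 0 then cs ++ [' '] else cs with hp
  have heven : padded.length % 2 = 0 := by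
    rw [hp]
    split
    next hodd => simp only [List.length_append, List.length_cons, List.length_nil]; omega
    next hev => omega
  obtain ⟨M, hM⟩ : ∃ M, padded.length = 2 * M := ⟨padded.length / 2, by omega⟩
  rw [PySem.List.foldl_append_singleton_eq_map]
  rw [List.nil_append]
  rw [PySem.List.pyRange_of_pos 0 (padded.length : Int) (by norm_num : (0:Int) < 2)]
  have hcount : (if (0:Int) < (padded.length : Int) then (((padded.length : Int) - 0 + 2 - 1) / 2).toNat else 0) = M := by
    split <;> omega
  rw [hcount, List.map_map]
  have hbody : ∀ k ∈ List.range M,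
      ((fun i => pvChunkA (PySem.List.pyGetD padded i ' ') (PySem.List.pyGetD padded (i + 1) ' ')) ∘ (fun k : Nat => (0 : Int) + 2 * (k : Int))) k
        = pvChunkA (padded.getD (2 * k) ' ') (padded.getD (2 * k + 1) ' ') := by
    intro k hk
    simp only [Function.comp]
    congr 1
    · rw [show (0:Int) + 2 * (k:Int) = ((2 * k : Nat) : Int) from by push_cast; ring,
          PySem.List.pyGetD_natCast]
    · rw [show (0:Int) + 2 * (k:Int) + 1 = ((2 * k + 1 : Nat) : Int) from by push_cast; ring,
          PySem.List.pyGetD_natCast]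
  rw [List.map_congr_left hbody]
  rw [pairs_loop pvChunkA M padded hM]
  apply List.map_congr_left
  intro p _
  exact chunk_eq p.1 p.2
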